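-- pv_equiv track=rewrite | github.com/nitin001singh/Data-Structure---Algorithm | OA/Program15.py | answer
-- ===== SOURCE A (Python) =====
-- def answer(a,b,c,d,e):
--     count = 0
--     for i in range(len(a)):
--         for j in range(len(b)):
--             for k in range(len(c)):
--                 for l in range(len(d)):
--                     for m in range(len(e)):
--
--                         if (a[i] + b[j] + c[k] + d[l] + e[m]) == 0:
--                             count += 1
--     return count
-- ===== SOURCE B (Python) =====
-- def answer(a, b, c, d, e):
--     pair_sums = {}
--     for x in a:
--         for y in b:
--             s = x + y
--             pair_sums[s] = pair_sums.get(s, 0) + 1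
--     count = 0
--     for x in c:
--         for y in d:
--             for z in e:
--                 count += pair_sums.get(-(x + y + z), 0)
--     return count
-- ===== Notes on version B (the rewrite author's own statement) =====
-- stated objective: faster
-- what changed: Replaces the five nested index loops with a hash table of all a+b pair sums, then a triple loop over c,d,e that adds the table count of the negated partial sum.
import Mathlib
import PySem

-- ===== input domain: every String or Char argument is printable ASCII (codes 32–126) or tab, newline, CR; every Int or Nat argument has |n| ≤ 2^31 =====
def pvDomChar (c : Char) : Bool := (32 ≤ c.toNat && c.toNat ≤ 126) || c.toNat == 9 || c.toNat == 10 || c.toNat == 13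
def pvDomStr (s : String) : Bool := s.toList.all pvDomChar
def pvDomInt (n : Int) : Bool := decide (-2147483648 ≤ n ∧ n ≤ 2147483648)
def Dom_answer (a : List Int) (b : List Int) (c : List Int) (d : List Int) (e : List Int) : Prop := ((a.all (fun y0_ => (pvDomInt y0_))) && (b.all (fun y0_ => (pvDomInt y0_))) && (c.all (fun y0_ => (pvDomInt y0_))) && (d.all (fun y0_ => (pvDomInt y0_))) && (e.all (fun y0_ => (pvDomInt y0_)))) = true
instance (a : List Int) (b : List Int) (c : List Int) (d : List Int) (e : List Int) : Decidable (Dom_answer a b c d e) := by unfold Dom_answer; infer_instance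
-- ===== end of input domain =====

-- B replaces A's five nested index loops by a dict of all a+b pair sums plus a triple loop
-- over c, d, e that looks up the negated partial sum (objective: faster).

-- ===== PORT A =====
-- literal transliteration of A's five nested 'for i in range(len(..))' loops
def answer (a : List Int) (b : List Int) (c : List Int) (d : List Int) (e : List Int) : Int :=
  (PySem.List.pyRange 0 (PySem.List.len a) 1).foldl (fun count i =>
    (PySem.List.pyRange 0 (PySem.List.len b) 1).foldl (fun count j =>
      (PySem.List.pyRange 0 (PySem.List.len c) 1).foldl (fun count k =>
        (PySem.List.pyRange 0 (PySem.List.len d) 1).foldl (fun count l =>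
          (PySem.List.pyRange 0 (PySem.List.len e) 1).foldl (fun count m =>
            if PySem.List.pyGetD a i 0 + PySem.List.pyGetD b j 0 + PySem.List.pyGetD c k 0
                + PySem.List.pyGetD d l 0 + PySem.List.pyGetD e m 0 == 0
            then count + 1 else count) count) count) count) count) 0

-- ===== PORT B =====
-- literal transliteration of Source B: build the dict of a+b pair sums, then the triple loop
def answer_alt (a : List Int) (b : List Int) (c : List Int) (d : List Int) (e : List Int) : Int :=
  let pairSums : PySem.Dict Int Int :=
    a.foldl (fun ps x =>
      b.foldl (fun ps y => ps.insert (x + y) (ps.getD (x + y) 0 + 1)) ps) PySem.Dict.empty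
  c.foldl (fun count x =>
    d.foldl (fun count y =>
      e.foldl (fun count z => count + pairSums.getD (-(x + y + z)) 0) count) count) 0

-- ===== PRECONDITION & SPEC =====
def Spec_answer (a : List Int) (b : List Int) (c : List Int) (d : List Int) (e : List Int) (out : Int) : Prop := out = answer_alt a b c d e
instance (a : List Int) (b : List Int) (c : List Int) (d : List Int) (e : List Int) (out : Int) : Decidable (Spec_answer a b c d e out) := by unfold Spec_answer; infer_instance

-- ===== CLAIM (what is proved, stated in full; the proofs are below) =====
def Claim_equal_answer : Prop := ∀ (a : List Int) (b : List Int) (c : List Int) (d : List Int) (e : List Int), Dom_answer a b c d e → Spec_answer a b c d e (answer a b c d e)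

-- ===== LEMMAS AND PROOFS =====

-- the multiset of all pair sums x+y (x from a, y from b)
def pairList (a b : List Int) : List Int := a.flatMap (fun x => b.map (fun y => x + y))

-- the multiset of all triple sums x+y+z (x from c, y from d, z from e)
def tripList (c d e : List Int) : List Int :=
  c.flatMap (fun x => d.flatMap (fun y => e.map (fun z => x + y + z)))

-- a sum over a flatMap is the nested sum
lemma sum_map_flatMap {α β : Type} (ll : List α) (ff : α → List β) (g : β → Int) :
    ((ll.flatMap ff).map g).sum = (ll.map (fun x => ((ff x).map g).sum)).sum := by
  induction ll with
  | nil => simp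
  | cons h t ih => simp [List.flatMap_cons, ih]

-- the dict built by B's first double loop is the multiplicity table of pairList
lemma pairSums_getD (a b : List Int) (v : Int) :
    (a.foldl (fun ps x => b.foldl (fun ps y => ps.insert (x + y) (ps.getD (x + y) 0 + 1)) ps)
      PySem.Dict.empty).getD v 0 = ((pairList a b).count v : Int) := by
  have h1 : ∀ (x : Int) (ps : PySem.Dict Int Int),
      b.foldl (fun ps y => ps.insert (x + y) (ps.getD (x + y) 0 + 1)) ps
        = (b.map (fun y => x + y)).foldl (fun ps s => ps.insert s (ps.getD s 0 + 1)) ps := by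
    intro x ps; rw [List.foldl_map]
  simp only [h1]
  rw [← List.foldl_flatMap, ← pairList, PySem.Dict.getD_foldl_insert_add_one]
  simp [PySem.Dict.getD_empty]

-- B counts, for each triple sum t, the pairs summing to -t
lemma alt_closed (a b c d e : List Int) :
    answer_alt a b c d e
      = ((tripList c d e).map (fun t => ((pairList a b).count (-t) : Int))).sum := by
  unfold answer_alt
  simp only [PySem.List.foldl_add, pairSums_getD, zero_add, tripList,
    sum_map_flatMap, List.map_map, Function.comp_def]

-- the count of -s among the triple sums, written as A's inner three loops compute it
lemma count_tripList (c d e : List Int) (s : Int) :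
    ((tripList c d e).count (-s) : Int)
      = (c.map (fun z => (d.map (fun w =>
          ((e.countP (fun v => s + z + w + v == 0)) : Int))).sum)).sum := by
  rw [List.count, ← PySem.List.sum_map_ite_one_zero (fun t => t == -s) (tripList c d e), tripList]
  simp only [sum_map_flatMap, List.map_map, Function.comp_def]
  apply congrArg List.sum
  apply List.map_congr_left; intro z _
  apply congrArg List.sum
  apply List.map_congr_left; intro w _
  rw [PySem.List.sum_map_ite_one_zero (fun v => z + w + v == -s) e]
  apply congrArg
  apply List.countP_congr
  intro v _
  simp only [beq_iff_eq]
  omega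

-- A's pyRange index loops are loops over the lists themselves
lemma answer_loops (a b c d e : List Int) :
    answer a b c d e = a.foldl (fun count x =>
      b.foldl (fun count y =>
        c.foldl (fun count z =>
          d.foldl (fun count w =>
            e.foldl (fun count v =>
              if x + y + z + w + v == 0 then count + 1 else count) count) count) count) count) 0 := by
  unfold answer
  simp only [PySem.List.len_eq]
  rw [PySem.List.foldl_pyRange_zero_pyGetD' a 0
    (f := fun count x =>
      (PySem.List.pyRange 0 (b.length : Int)).foldl (fun count j =>
        (PySem.List.pyRange 0 (c.length : Int)).foldl (fun count k =>
          (PySem.List.pyRange 0 (d.length : Int)).foldl (fun count l =>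
            (PySem.List.pyRange 0 (e.length : Int)).foldl (fun count m =>
              if x + PySem.List.pyGetD b j 0 + PySem.List.pyGetD c k 0
                  + PySem.List.pyGetD d l 0 + PySem.List.pyGetD e m 0 == 0
              then count + 1 else count) count) count) count) count)]
  apply PySem.List.foldl_congr_mem; intro acc x _
  rw [PySem.List.foldl_pyRange_zero_pyGetD' b 0
    (f := fun count y =>
      (PySem.List.pyRange 0 (c.length : Int)).foldl (fun count k =>
        (PySem.List.pyRange 0 (d.length : Int)).foldl (fun count l =>
          (PySem.List.pyRange 0 (e.length : Int)).foldl (fun count m =>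
            if x + y + PySem.List.pyGetD c k 0
                + PySem.List.pyGetD d l 0 + PySem.List.pyGetD e m 0 == 0
            then count + 1 else count) count) count) count)]
  apply PySem.List.foldl_congr_mem; intro acc y _
  rw [PySem.List.foldl_pyRange_zero_pyGetD' c 0
    (f := fun count z =>
      (PySem.List.pyRange 0 (d.length : Int)).foldl (fun count l =>
        (PySem.List.pyRange 0 (e.length : Int)).foldl (fun count m =>
          if x + y + z + PySem.List.pyGetD d l 0 + PySem.List.pyGetD e m 0 == 0
          then count + 1 else count) count) count)]
  apply PySem.List.foldl_congr_mem; intro acc z _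
  rw [PySem.List.foldl_pyRange_zero_pyGetD' d 0
    (f := fun count w =>
      (PySem.List.pyRange 0 (e.length : Int)).foldl (fun count m =>
        if x + y + z + w + PySem.List.pyGetD e m 0 == 0
        then count + 1 else count) count)]
  apply PySem.List.foldl_congr_mem; intro acc w _
  rw [PySem.List.foldl_pyRange_zero_pyGetD' e 0
    (f := fun count v =>
      if x + y + z + w + v == 0 then count + 1 else count)]

-- A counts, for each pair sum s, the triples summing to -s
lemma answer_closed (a b c d e : List Int) :
    answer a b c d e
      = ((pairList a b).map (fun s => ((tripList c d e).count (-s) : Int))).sum := by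
  rw [answer_loops]
  simp only [PySem.List.foldl_if_add_one, PySem.List.foldl_add, zero_add, pairList,
    sum_map_flatMap, List.map_map, Function.comp_def, count_tripList]

-- exchanging the two summations: counting pairs per triple equals counting triples per pair
lemma sum_count_comm (P Q : List Int) :
    (P.map (fun s => (Q.count (-s) : Int))).sum = (Q.map (fun t => (P.count (-t) : Int))).sum := by
  induction P with
  | nil => simp
  | cons s P ih =>
      simp only [List.map_cons, List.sum_cons, ih]
      have h1 : ∀ t : Int, (((s :: P).count (-t) : Nat) : Int)
          = ((P.count (-t) : Nat) : Int) + (if (s == -t) = true then (1:Int) else 0) := by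
        intro t
        rw [List.count_cons]
        split_ifs <;> push_cast <;> ring
      calc (Q.count (-s) : Int) + (Q.map fun t => ((P.count (-t) : Nat) : Int)).sum
          = (Q.map fun t => ((P.count (-t) : Nat) : Int)).sum
              + (Q.map fun t => if (s == -t) = true then (1:Int) else 0).sum := by
            rw [PySem.List.sum_map_ite_one_zero (fun t => s == -t) Q]
            have h2 : Q.countP (fun t => s == -t) = Q.count (-s) := by
              rw [List.count]
              apply List.countP_congr
              intro t _
              simp only [beq_iff_eq]
              omega
            rw [h2]; ring
        _ = (Q.map fun t => (((s :: P).count (-t) : Nat) : Int)).sum := by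
            rw [← PySem.List.sum_map_add_int]
            apply congrArg List.sum
            apply List.map_congr_left; intro t _
            rw [h1]

-- ===== VERDICT (by name: the statement is the Claim_ definition above) =====
theorem answer_spec : Claim_equal_answer := by
  intro a b c d e _
  unfold Spec_answer
  rw [answer_closed, alt_closed, sum_count_comm]
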